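-- pv_equiv track=rewrite | github.com/AbelAbraham77/CodeForces_Solutions_Python3 | Live Contest/Educational CodeForces Round 168/A.py | calculate_typing_time
-- ===== SOURCE A (Python) =====
-- def calculate_typing_time(s):
--     if not s:
--         return 0
--     time = 2  # time for the first character
--     for i in range(1, len(s)):
--         if s[i] == s[i-1]:
--             time += 1
--         else:
--             time += 2
--     return time
-- ===== SOURCE B (Python) =====
-- def calculate_typing_time(s):
--     # Run-length decomposition: each maximal run of k identical characters
--     # costs k + 1 (2 for its first character, 1 for each repeat).
--     time = 0
--     i = 0
--     n = len(s)
--     while i < n: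
--         j = i
--         while j < n and s[j] == s[i]:
--             j += 1
--         time += (j - i) + 1
--         i = j
--     return time
-- ===== Notes on version B (the rewrite author's own statement) =====
-- stated objective: alternative
-- what changed: Replaced A's per-index if/else accumulator with a two-pointer run-length decomposition: an outer loop walks maximal runs of identical characters (inner scan finds each run's end) and adds run_length + 1 per run, so the total is len(s) + number_of_runs.
import Mathlib
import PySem

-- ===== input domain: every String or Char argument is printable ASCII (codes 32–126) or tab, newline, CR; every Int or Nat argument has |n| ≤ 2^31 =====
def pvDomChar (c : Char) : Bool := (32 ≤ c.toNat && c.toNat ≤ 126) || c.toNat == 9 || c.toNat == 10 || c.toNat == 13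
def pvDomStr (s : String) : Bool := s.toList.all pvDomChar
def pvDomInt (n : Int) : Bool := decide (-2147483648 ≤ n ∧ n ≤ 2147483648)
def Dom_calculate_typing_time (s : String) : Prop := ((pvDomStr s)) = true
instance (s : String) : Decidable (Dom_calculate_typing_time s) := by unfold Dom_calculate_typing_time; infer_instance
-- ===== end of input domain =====

-- B replaces A's per-index if/else accumulator by a two-pointer run-length decomposition
-- (each maximal run of k identical characters costs k + 1); objective: alternative.

-- ===== PORT A =====
def calculate_typing_time (s : String) : Int :=
  let l := s.toList
  if l.isEmpty then 0
  else
    (PySem.List.pyRange 1 l.length 1).foldl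
      (fun time i =>
        if PySem.List.pyGet? l i = PySem.List.pyGet? l (i - 1) then time + 1 else time + 2) 2

-- ===== PORT B =====
-- inner while loop: count how many leading chars of the suffix equal the run head c,
-- return that count and the rest of the list
def pvRunSplit (c : Char) : List Char → Nat × List Char
  | [] => (0, [])
  | x :: xs => if x = c then
      let p := pvRunSplit c xs
      (p.1 + 1, p.2)
    else (0, x :: xs)

lemma pvRunSplit_len (c : Char) : ∀ xs : List Char, (pvRunSplit c xs).2.length ≤ xs.length := by
  intro xs
  induction xs with
  | nil => simp [pvRunSplit]
  | cons x t ih =>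
    by_cases h : x = c <;> simp [pvRunSplit, h] <;> omega

-- outer while loop: walk the runs, each run of length k+1 contributes (k+1)+1
def pvRuns : List Char → Int
  | [] => 0
  | c :: rest =>
      let p := pvRunSplit c rest
      ((p.1 : Int) + 1 + 1) + pvRuns p.2
termination_by l => l.length
decreasing_by
  have := pvRunSplit_len c rest
  simp; omega

def calculate_typing_time_alt (s : String) : Int := pvRuns s.toList

-- ===== PRECONDITION & SPEC =====
def Spec_calculate_typing_time (s : String) (out : Int) : Prop := out = calculate_typing_time_alt s
instance (s : String) (out : Int) : Decidable (Spec_calculate_typing_time s out) := by unfold Spec_calculate_typing_time; infer_instance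

-- ===== CLAIM (what is proved, stated in full; the proofs are below) =====
def Claim_equal_calculate_typing_time : Prop := ∀ (s : String), Dom_calculate_typing_time s → Spec_calculate_typing_time s (calculate_typing_time s)

-- ===== LEMMAS AND PROOFS =====

/-- Number of adjacent equal pairs, the quantity A's loop effectively subtracts from 2n. -/
def pvEq : List Char → Int
  | [] => 0
  | [_] => 0
  | a :: b :: t => (if a = b then (1 : Int) else 0) + pvEq (b :: t)

lemma pvEq_drop (l : List Char) (j : Nat) (h : j + 1 < l.length) :
    pvEq (l.drop j) = (if l[j] = l[j + 1] then (1 : Int) else 0) + pvEq (l.drop (j + 1)) := by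
  have h1 : l.drop j = l[j] :: l.drop (j + 1) := List.drop_eq_getElem_cons (by omega)
  have h2 : l.drop (j + 1) = l[j + 1] :: l.drop (j + 2) := List.drop_eq_getElem_cons (by omega)
  rw [h1, h2]
  simp [pvEq, ← h2]

lemma pv_aux (l : List Char) : ∀ (k j : Nat) (acc : Int), j < l.length → l.length - j ≤ k →
    (PySem.List.pyRange ((j : Int) + 1) l.length 1).foldl
      (fun time i =>
        if PySem.List.pyGet? l i = PySem.List.pyGet? l (i - 1) then time + 1 else time + 2) acc
    = acc + 2 * ((l.length : Int) - (j + 1)) - pvEq (l.drop j) := by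
  intro k
  induction k with
  | zero => intro j acc hj hk; omega
  | succ k ih =>
    intro j acc hj hk
    by_cases hlast : j + 1 = l.length
    · have hnil : PySem.List.pyRange ((j : Int) + 1) l.length 1 = [] :=
        PySem.List.pyRange_one_eq_nil (by omega)
      have hdrop : l.drop j = [l[j]] := by
        have hnil2 : l.drop (j + 1) = [] := List.drop_eq_nil_of_le (by omega)
        rw [List.drop_eq_getElem_cons (by omega), hnil2]
      rw [hnil, hdrop]
      simp [pvEq]
      omega
    · have hlt : j + 1 < l.length := by omega
      have hcons : PySem.List.pyRange ((j : Int) + 1) l.length 1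
          = ((j : Int) + 1) :: PySem.List.pyRange ((j : Int) + 1 + 1) l.length 1 := by
        exact PySem.List.pyRange_one_cons (by exact_mod_cast hlt)
      rw [hcons]
      simp only [List.foldl_cons]
      have hg1 : PySem.List.pyGet? l ((j : Int) + 1) = some l[j + 1] := by
        have hc : ((j + 1 : Nat) : Int) = (j : Int) + 1 := by push_cast; ring
        rw [← hc, PySem.List.pyGet?_natCast]
        exact List.getElem?_eq_getElem hlt
      have hg0 : PySem.List.pyGet? l ((j : Int) + 1 - 1) = some l[j] := by
        have hc : ((j : Nat) : Int) = (j : Int) + 1 - 1 := by ring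
        rw [← hc, PySem.List.pyGet?_natCast]
        exact List.getElem?_eq_getElem hj
      have hstep : (PySem.List.pyRange ((j : Int) + 1 + 1) l.length 1)
          = (PySem.List.pyRange (((j + 1 : Nat) : Int) + 1) l.length 1) := by push_cast; ring_nf
      rw [hg1, hg0, hstep, ih (j + 1) _ hlt (by omega)]
      rw [pvEq_drop l j hlt]
      by_cases he : l[j + 1] = l[j]
      · simp [he]; ring
      · have he' : ¬ l[j] = l[j + 1] := fun h => he h.symm
        simp [he, he']; ring

/-- A's closed form: A computes 2n − (number of adjacent equal pairs). -/
lemma pvA_closed (s : String) :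
    calculate_typing_time s = 2 * (s.toList.length : Int) - pvEq s.toList := by
  unfold calculate_typing_time
  set l := s.toList with hl
  by_cases hnil : l.isEmpty
  · rw [List.isEmpty_iff] at hnil
    simp [hnil, pvEq]
  · simp only [hnil, if_false]
    have hpos : 0 < l.length := by
      rw [List.isEmpty_iff] at hnil
      exact List.length_pos_of_ne_nil hnil
    have := pv_aux l l.length 0 2 hpos (by omega)
    simp only [Nat.cast_zero, zero_add] at this
    rw [this]
    simp only [List.drop_zero]
    push_cast
    ring

lemma pvRunSplit_split (c : Char) : ∀ xs : List Char,
    xs = List.replicate (pvRunSplit c xs).1 c ++ (pvRunSplit c xs).2 ∧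
    (∀ y t, (pvRunSplit c xs).2 = y :: t → y ≠ c) := by
  intro xs
  induction xs with
  | nil => simp [pvRunSplit]
  | cons x t ih =>
    by_cases h : x = c
    · subst h
      refine ⟨?_, ?_⟩
      · simp only [pvRunSplit, if_pos rfl, List.replicate_succ, List.cons_append]
        exact congrArg (x :: ·) ih.1
      · intro y t' hy
        apply ih.2 y t'
        simpa [pvRunSplit] using hy
    · refine ⟨by simp [pvRunSplit, h], ?_⟩
      intro y t' hy
      simp only [pvRunSplit, h, if_false] at hy
      cases hy
      exact h

/-- pvEq over a run head: c followed by k copies of c and a block not starting with c. -/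
lemma pvEq_run (c : Char) (r : List Char) (hr : ∀ y t, r = y :: t → y ≠ c) :
    ∀ k : Nat, pvEq (c :: (List.replicate k c ++ r)) = (k : Int) + pvEq r := by
  intro k
  induction k with
  | zero =>
    cases r with
    | nil => simp [pvEq]
    | cons y t =>
      have hy : y ≠ c := hr y t rfl
      have hcy : ¬ c = y := fun h => hy h.symm
      simp [pvEq, hcy]
  | succ k ih =>
    simp only [List.replicate_succ, List.cons_append, pvEq, if_true]
    rw [ih]
    push_cast
    ring

/-- B equals the same closed form. -/
lemma pvB_closed : ∀ l : List Char, pvRuns l = 2 * (l.length : Int) - pvEq l := by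
  intro l
  induction l using pvRuns.induct with
  | case1 => simp [pvRuns, pvEq]
  | case2 c rest p ih =>
    obtain ⟨hrest, hhead⟩ := pvRunSplit_split c rest
    rw [pvRuns]
    rw [ih]
    have hlen : rest.length = (pvRunSplit c rest).1 + (pvRunSplit c rest).2.length := by
      conv_lhs => rw [hrest]
      simp
    have heq : pvEq (c :: rest) = ((pvRunSplit c rest).1 : Int) + pvEq (pvRunSplit c rest).2 := by
      conv_lhs => rw [hrest]
      exact pvEq_run c (pvRunSplit c rest).2 hhead (pvRunSplit c rest).1
    rw [heq]
    simp only [List.length_cons, hlen]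
    push_cast
    ring

-- ===== VERDICT (by name: the statement is the Claim_ definition above) =====
theorem calculate_typing_time_spec : Claim_equal_calculate_typing_time := by
  intro s _
  unfold Spec_calculate_typing_time calculate_typing_time_alt
  rw [pvA_closed, pvB_closed]
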